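-- pv_equiv track=rewrite | github.com/edwardzhu/checkio-solution | EmpireOfCode/numberBase.py | convert
-- ===== SOURCE A (Python) =====
-- def convert(str_number, radix):
--     l = list(str_number)
--     lens = len(l)
--     result = 0
--     for i in range(lens):
--         v = ord(l[i]) - 55
--         if v < 3 and int(l[i]) < radix:
--             result += int(l[i]) * (radix ** (lens - i - 1))
--         elif radix > v > 2:
--             result += v * (radix ** (lens - i - 1))
--         else:
--             return -1
--     return result
-- ===== SOURCE B (Python) =====
-- def convert(str_number, radix):
--     # Horner's method: one multiply-add per character instead of a fresh
--     # radix ** k big-integer power for every position.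
--     result = 0
--     for ch in str_number:
--         o = ord(ch)
--         if 48 <= o <= 57:
--             d = o - 48
--         elif o >= 58:
--             d = o - 55
--         else:
--             return -1
--         if d >= radix:
--             return -1
--         result = result * radix + d
--     return result
-- ===== Notes on version B (the rewrite author's own statement) =====
-- stated objective: faster
-- what changed: Replaced A's per-position radix**(lens-i-1) big-integer power (recomputed from scratch each iteration) with Horner's method, one multiply-add per character, keeping the same digit validation and -1 on the first invalid character.
-- crash fix: On strings whose first character failing its branch test has code < 48 (whitespace/punctuation before '0'), A raises ValueError from int(); B returns -1 as for any invalid character. — e.g. on convert("!", 10): A raises ValueError, B returns -1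
import Mathlib
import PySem

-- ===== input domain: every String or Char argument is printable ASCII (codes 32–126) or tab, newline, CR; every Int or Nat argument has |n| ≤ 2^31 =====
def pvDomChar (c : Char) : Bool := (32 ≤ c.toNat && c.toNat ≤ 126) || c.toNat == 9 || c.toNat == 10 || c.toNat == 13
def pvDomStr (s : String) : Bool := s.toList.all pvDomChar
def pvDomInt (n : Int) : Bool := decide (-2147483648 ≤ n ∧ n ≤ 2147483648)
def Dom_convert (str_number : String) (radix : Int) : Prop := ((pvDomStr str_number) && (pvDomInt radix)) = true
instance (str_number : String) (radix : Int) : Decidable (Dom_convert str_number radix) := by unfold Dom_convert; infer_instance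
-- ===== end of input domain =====

-- B replaces A's per-position `radix ** (lens - i - 1)` big-integer power with Horner's
-- multiply-add accumulator (one multiplication per character); same validation and -1 result.


-- ===== PORT A =====
-- literal port of A's index loop as structural recursion on the remaining characters:
-- `lens - i - 1` is exactly `rest.length`; `int(l[i])` is PySem.Int.ofChars? [c]
def convertLoop (radix : Int) : List Char → Int → Int
  | [], result => result
  | c :: rest, result =>
    let v : Int := (c.toNat : Int) - 55
    if v < 3 then
      match PySem.Int.ofChars? [c] with
      | none => -1   -- Python raises ValueError from int() here (excluded by Pre_convert)
      | some d =>
        if d < radix then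
          convertLoop radix rest (result + d * radix ^ rest.length)
        else if radix > v ∧ v > 2 then
          convertLoop radix rest (result + v * radix ^ rest.length)
        else -1
    else if radix > v ∧ v > 2 then
      convertLoop radix rest (result + v * radix ^ rest.length)
    else -1

def convert (str_number : String) (radix : Int) : Int :=
  convertLoop radix str_number.toList 0

-- ===== PORT B =====
-- port of Source B: Horner accumulator, one multiply-add per character
def hornerLoop (radix : Int) : List Char → Int → Int
  | [], result => result
  | c :: rest, result =>
    -- o = ord(ch); digit value by range test, then the single radix check
    match (if 48 ≤ (c.toNat : Int) ∧ (c.toNat : Int) ≤ 57 then some ((c.toNat : Int) - 48)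
           else if 58 ≤ (c.toNat : Int) then some ((c.toNat : Int) - 55)
           else none : Option Int) with
    | none => -1
    | some d => if d ≥ radix then -1 else hornerLoop radix rest (result * radix + d)

def convert_alt (str_number : String) (radix : Int) : Int :=
  hornerLoop radix str_number.toList 0

-- ===== PRECONDITION & SPEC =====
-- character passing its branch test in A (digit below radix, or code ≥ 58 with code-55 below radix)
def pvGood (radix : Int) (c : Char) : Bool :=
  if 48 ≤ c.toNat ∧ c.toNat ≤ 57 then decide ((c.toNat : Int) - 48 < radix)
  else if 58 ≤ c.toNat then decide ((c.toNat : Int) - 55 < radix)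
  else false

-- Pre_convert excludes exactly the inputs on which A raises ValueError from int(): those whose
-- first character failing its branch test has code < 48 (whitespace or punctuation before '0').
def Pre_convert (str_number : String) (radix : Int) : Prop :=
  ((str_number.toList.dropWhile (pvGood radix)).head?.all (fun c => decide (48 ≤ c.toNat))) = true
instance (str_number : String) (radix : Int) : Decidable (Pre_convert str_number radix) := by
  unfold Pre_convert; infer_instance

def pvWitness_convert : String × Int := ("A3", 16)

-- On strings whose first character failing its branch test has code < 48, A raises ValueError
-- from int(); B returns -1 (first invalid character).
def Raises_convert (str_number : String) (radix : Int) : Prop :=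
  ((str_number.toList.dropWhile (pvGood radix)).head?.any (fun c => decide (c.toNat < 48))) = true
instance (str_number : String) (radix : Int) : Decidable (Raises_convert str_number radix) := by
  unfold Raises_convert; infer_instance

def pvRaiseWitness_convert : String × Int := ("!", 10)
def pvRaiseWitnessOut_convert : Int := -1

def Spec_convert (str_number : String) (radix : Int) (out : Int) : Prop := out = convert_alt str_number radix
instance (str_number : String) (radix : Int) (out : Int) : Decidable (Spec_convert str_number radix out) := by unfold Spec_convert; infer_instance

-- ===== CLAIM (what is proved, stated in full; the proofs are below) =====
def Claim_equal_convert : Prop := ∀ (str_number : String) (radix : Int), Dom_convert str_number radix → Pre_convert str_number radix → Spec_convert str_number radix (convert str_number radix)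

def Claim_raises_convert : Prop := (∀ (str_number : String) (radix : Int), Dom_convert str_number radix → Raises_convert str_number radix → ¬ Pre_convert str_number radix) ∧ (Dom_convert (pvRaiseWitness_convert.1) (pvRaiseWitness_convert.2) ∧ Raises_convert (pvRaiseWitness_convert.1) (pvRaiseWitness_convert.2) ∧ convert_alt (pvRaiseWitness_convert.1) (pvRaiseWitness_convert.2) = pvRaiseWitnessOut_convert)

-- ===== LEMMAS AND PROOFS =====

theorem ofChars_digit (c : Char) (h1 : 48 ≤ c.toNat) (h2 : c.toNat ≤ 57) :
    PySem.Int.ofChars? [c] = some ((c.toNat : Int) - 48) := by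
  obtain ⟨n, hn⟩ : ∃ n, c.toNat = n := ⟨_, rfl⟩
  rw [hn] at h1 h2
  have hc : c = Char.ofNat n := by rw [← hn, Char.ofNat_toNat]
  subst hc
  interval_cases n <;> decide

-- common specification: the digit values checked against radix, combined positionally;
-- none = some character is invalid
def pvEval (radix : Int) : List Char → Option Int
  | [] => some 0
  | c :: rest =>
    match (if 48 ≤ (c.toNat : Int) ∧ (c.toNat : Int) ≤ 57 then some ((c.toNat : Int) - 48)
           else if 58 ≤ (c.toNat : Int) then some ((c.toNat : Int) - 55)
           else none : Option Int) with
    | none => none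
    | some d =>
      if d < radix then (pvEval radix rest).map (fun v => d * radix ^ rest.length + v)
      else none

theorem convertLoop_eval (radix : Int) (l : List Char)
    (hpre : ∀ c ∈ (l.dropWhile (pvGood radix)).head?, 48 ≤ c.toNat) (acc : Int) :
    convertLoop radix l acc = (pvEval radix l).elim (-1) (acc + ·) := by
  induction l generalizing acc with
  | nil => simp [convertLoop, pvEval]
  | cons c rest ih =>
    rw [pvEval]
    by_cases hd : 48 ≤ c.toNat ∧ c.toNat ≤ 57
    · -- digit character
      have hdI : 48 ≤ (c.toNat : Int) ∧ (c.toNat : Int) ≤ 57 := by omega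
      have hv : (c.toNat : Int) - 55 < 3 := by omega
      rw [if_pos hdI]
      by_cases hlt : (c.toNat : Int) - 48 < radix
      · have hg : pvGood radix c = true := by simp [pvGood, hd, hlt]
        have hpre' : ∀ c' ∈ (rest.dropWhile (pvGood radix)).head?, 48 ≤ c'.toNat := by
          rwa [List.dropWhile_cons_of_pos hg] at hpre
        simp only [convertLoop, ofChars_digit c hd.1 hd.2, if_pos hv, if_pos hlt, ih hpre']
        cases pvEval radix rest with
        | none => simp
        | some v => simp; ring
      · have hv2 : ¬ (radix > (c.toNat : Int) - 55 ∧ (c.toNat : Int) - 55 > 2) := by omega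
        simp [convertLoop, ofChars_digit c hd.1 hd.2, hv, hlt, hv2]
    · have hdI : ¬ (48 ≤ (c.toNat : Int) ∧ (c.toNat : Int) ≤ 57) := by omega
      rw [if_neg hdI]
      by_cases h58 : 58 ≤ c.toNat
      · -- letter-range character, value code - 55 ≥ 3
        have h58I : 58 ≤ (c.toNat : Int) := by omega
        have hv : ¬ ((c.toNat : Int) - 55 < 3) := by omega
        rw [if_pos h58I]
        by_cases hlt : (c.toNat : Int) - 55 < radix
        · have hg : pvGood radix c = true := by simp [pvGood, hd, h58, hlt]
          have hpre' : ∀ c' ∈ (rest.dropWhile (pvGood radix)).head?, 48 ≤ c'.toNat := by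
            rwa [List.dropWhile_cons_of_pos hg] at hpre
          have hcond : radix > (c.toNat : Int) - 55 ∧ (c.toNat : Int) - 55 > 2 := by omega
          simp only [convertLoop, if_neg hv, if_pos hcond, if_pos hlt, ih hpre']
          cases pvEval radix rest with
          | none => simp
          | some v => simp; ring
        · have hcond2 : ¬ (radix > (c.toNat : Int) - 55 ∧ (c.toNat : Int) - 55 > 2) := by omega
          simp [convertLoop, hv, hlt]
      · -- low character: excluded by the precondition
        exfalso
        have hg : pvGood radix c = false := by simp [pvGood, hd, h58]
        rw [List.dropWhile_cons_of_neg (by simp [hg])] at hpre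
        have := hpre c (by simp)
        omega

theorem hornerLoop_eval (radix : Int) (l : List Char) (acc : Int) :
    hornerLoop radix l acc = (pvEval radix l).elim (-1) (fun v => acc * radix ^ l.length + v) := by
  induction l generalizing acc with
  | nil => simp [hornerLoop, pvEval]
  | cons c rest ih =>
    rw [pvEval, hornerLoop]
    cases (if 48 ≤ (c.toNat : Int) ∧ (c.toNat : Int) ≤ 57 then some ((c.toNat : Int) - 48)
           else if 58 ≤ (c.toNat : Int) then some ((c.toNat : Int) - 55)
           else none : Option Int) with
    | none => rfl
    | some d =>
      by_cases hlt : d < radix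
      · simp only [ge_iff_le, if_neg (not_le.mpr hlt), if_pos hlt, ih]
        cases pvEval radix rest with
        | none => simp
        | some v => simp [pow_succ]; ring
      · simp only [ge_iff_le, if_pos (not_lt.mp hlt), if_neg hlt]
        simp

-- ===== VERDICT (by name: the statement is the Claim_ definition above) =====
theorem convert_spec : Claim_equal_convert := by
  intro s radix _ hpre
  unfold Spec_convert convert convert_alt
  unfold Pre_convert at hpre
  rw [Option.all_eq_true] at hpre
  rw [convertLoop_eval radix s.toList (by simpa using hpre) 0, hornerLoop_eval]
  cases pvEval radix s.toList with
  | none => rfl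
  | some v => simp

theorem convert_raises : Claim_raises_convert := by
  unfold Claim_raises_convert
  refine ⟨?_, by decide⟩
  intro s radix _ hR hpre
  unfold Raises_convert at hR
  unfold Pre_convert at hpre
  rw [Option.any_eq_true] at hR
  rw [Option.all_eq_true] at hpre
  obtain ⟨c, hc, hlt⟩ := hR
  have := hpre c hc
  simp at hlt this
  omega

-- self-check: the raise witness itself lies outside Pre_convert (instance of convert_raises)
theorem pvRaiseWitness_outside_Pre_ok :
    ¬ Pre_convert pvRaiseWitness_convert.1 pvRaiseWitness_convert.2 := by
  have h := convert_raises
  unfold Claim_raises_convert at h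
  exact h.1 pvRaiseWitness_convert.1 pvRaiseWitness_convert.2 (by decide) (by decide)
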